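-- pv_equiv track=rewrite | github.com/kianaghassabi/error-pattern-processing | HextoBinLib.py | convertErrorPatternIntoBitSymbol
-- ===== SOURCE A (Python) =====
-- def convertErrorPatternIntoBitSymbol(list):
--     '''
--     Entery is list of all error patterns
--     and return each symbol in another list in bit rep
--     also puts all symbols lists into another list
--     so the answer will be a 3D list
--     [
--         [  [ [first bit of  first generation and first symbol],[],[] ],...],
--         [  [ [first bit of secind generation and first symbol],[],[] ],...]
--     ]
--
--     '''
--     errorPatternsInBitRep = []
--     for innerList in list:
--         binvalues = []
--         for i in range(len(innerList)):
--             binaryValues = bin(int('1'+innerList[i], 16))[3:]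
--             # split it by bits
--             binvalues.append([x for x in binaryValues])
--         errorPatternsInBitRep.append(binvalues)
--     return errorPatternsInBitRep
-- ===== SOURCE B (Python) =====
-- def convertErrorPatternIntoBitSymbol(list):
--     # Per-hex-digit nibble expansion instead of building one big integer per symbol.
--     return [[[b for c in symbol for b in format(int(c, 16), '04b')]
--              for symbol in innerList]
--             for innerList in list]
-- ===== Notes on version B (the rewrite author's own statement) =====
-- stated objective: alternative
-- what changed: Instead of prefixing '1', building one big integer from the whole hex string and slicing its bin() representation, B expands each hex digit independently into its 4-bit binary string and flattens, avoiding big-integer construction entirely.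
-- outside the precondition, e.g. on convertErrorPatternIntoBitSymbol([['0_1']]): A returns [[['0', '0', '0', '0', '0', '0', '0', '1']]], B raises ValueError; on convertErrorPatternIntoBitSymbol([['7 ']]): A returns [[['0', '1', '1', '1']]], B raises ValueError
import Mathlib
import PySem

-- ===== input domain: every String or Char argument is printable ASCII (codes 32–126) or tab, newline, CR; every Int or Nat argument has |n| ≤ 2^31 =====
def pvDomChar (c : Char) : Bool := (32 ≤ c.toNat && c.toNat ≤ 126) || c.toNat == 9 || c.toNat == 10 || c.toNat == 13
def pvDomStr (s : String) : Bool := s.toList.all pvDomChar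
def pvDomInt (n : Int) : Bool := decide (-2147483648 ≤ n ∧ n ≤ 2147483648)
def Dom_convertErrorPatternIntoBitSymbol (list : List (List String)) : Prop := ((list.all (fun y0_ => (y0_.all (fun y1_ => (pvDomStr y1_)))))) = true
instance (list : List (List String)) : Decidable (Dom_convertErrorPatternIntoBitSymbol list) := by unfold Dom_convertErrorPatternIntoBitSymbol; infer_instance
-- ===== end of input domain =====

-- B replaces A's whole-symbol big-integer conversion (bin(int('1'+s,16))[3:]) by an
-- independent 4-bit expansion of each hex digit, flattened (objective: alternative decomposition).


set_option maxRecDepth 100000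

-- ===== PORT A =====
-- value of a single hex digit, as in Python's base-16 int parsing (none = not a hex digit)
def hexVal? (c : Char) : Option Nat :=
  if '0' ≤ c ∧ c ≤ '9' then some (c.toNat - 48)
  else if 'a' ≤ c ∧ c ≤ 'f' then some (c.toNat - 87)
  else if 'A' ≤ c ∧ c ≤ 'F' then some (c.toNat - 55)
  else none

-- int(<digits>, 16) accumulating left to right; none = ValueError (Pre_ excludes that;
-- exact on strings of plain hex digits — Python additionally tolerates '_' separators and
-- surrounding whitespace, which Pre_ excludes below)
def parseHexAux (acc : Nat) : List Char → Option Nat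
  | [] => some acc
  | c :: cs =>
    match hexVal? c with
    | none => none
    | some v => parseHexAux (16 * acc + v) cs

-- binary digits of n, most significant first (empty for 0); bin(n) = "0b" ++ these, for n ≥ 1
def binNat : Nat → List Char
  | 0 => []
  | n + 1 => binNat ((n + 1) / 2) ++ [if (n + 1) % 2 = 1 then '1' else '0']
  decreasing_by exact Nat.div_lt_self (Nat.succ_pos n) (by omega)

-- bin(int('1'+s,16))[3:], split into one-character strings
def aSymbol (s : String) : List String :=
  match parseHexAux 1 s.toList with
  | none => []   -- Python raises ValueError here; Pre_ excludes these inputs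
  | some n => (List.drop 3 ('0' :: 'b' :: (if n = 0 then ['0'] else binNat n))).map
      (fun c => String.ofList [c])

def convertErrorPatternIntoBitSymbol (list : List (List String)) : List (List (List String)) :=
  list.map (fun innerList => innerList.map aSymbol)

-- ===== PORT B =====
-- format(v, '04b') for a single hex digit value v < 16
def format4 (v : Nat) : List Char :=
  [if v / 8 % 2 = 1 then '1' else '0',
   if v / 4 % 2 = 1 then '1' else '0',
   if v / 2 % 2 = 1 then '1' else '0',
   if v % 2 = 1 then '1' else '0']

-- [b for c in symbol for b in format(int(c,16),'04b')]
def bSymbol (s : String) : List String :=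
  s.toList.flatMap (fun c =>
    match hexVal? c with
    | none => []   -- Python raises ValueError here; Pre_ excludes these inputs
    | some v => (format4 v).map (fun b => String.ofList [b]))

def convertErrorPatternIntoBitSymbol_alt (list : List (List String)) : List (List (List String)) :=
  list.map (fun innerList => innerList.map bSymbol)

-- ===== PRECONDITION & SPEC =====
-- Pre_ admits exactly strings made of plain hex digits: elsewhere A raises ValueError, except
-- that A also RETURNS on strings with '_' separators or trailing whitespace (tolerated by
-- Python's int()), where B's per-digit int(c,16) raises ValueError instead — those are excluded.
def isHexCharB (c : Char) : Bool :=
  decide (('0' ≤ c ∧ c ≤ '9') ∨ ('a' ≤ c ∧ c ≤ 'f') ∨ ('A' ≤ c ∧ c ≤ 'F'))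
def Pre_convertErrorPatternIntoBitSymbol (list : List (List String)) : Prop :=
  (list.all (fun inner => inner.all (fun s => s.toList.all isHexCharB))) = true
instance (list : List (List String)) : Decidable (Pre_convertErrorPatternIntoBitSymbol list) := by
  unfold Pre_convertErrorPatternIntoBitSymbol; infer_instance

def pvWitness_convertErrorPatternIntoBitSymbol : List (List String) := [["", "aF3"], ["07"], []]

def Spec_convertErrorPatternIntoBitSymbol (list : List (List String)) (out : List (List (List String))) : Prop := out = convertErrorPatternIntoBitSymbol_alt list
instance (list : List (List String)) (out : List (List (List String))) : Decidable (Spec_convertErrorPatternIntoBitSymbol list out) := by unfold Spec_convertErrorPatternIntoBitSymbol; infer_instance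

-- ===== CLAIM (what is proved, stated in full; the proofs are below) =====
def Claim_equal_convertErrorPatternIntoBitSymbol : Prop := ∀ (list : List (List String)), Dom_convertErrorPatternIntoBitSymbol list → Pre_convertErrorPatternIntoBitSymbol list → Spec_convertErrorPatternIntoBitSymbol list (convertErrorPatternIntoBitSymbol list)

-- ===== LEMMAS AND PROOFS =====

theorem hexVal?_lt {c : Char} {v : Nat} (h : hexVal? c = some v) : v < 16 := by
  unfold hexVal? at h
  split_ifs at h with h1 h2 h3 <;> injection h with h <;> subst h
  · have l' : (48 : Nat) ≤ c.toNat := by exact_mod_cast UInt32.le_iff_toNat_le.mp h1.1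
    have r' : c.toNat ≤ 57 := by exact_mod_cast UInt32.le_iff_toNat_le.mp h1.2
    omega
  · have l' : (97 : Nat) ≤ c.toNat := by exact_mod_cast UInt32.le_iff_toNat_le.mp h2.1
    have r' : c.toNat ≤ 102 := by exact_mod_cast UInt32.le_iff_toNat_le.mp h2.2
    omega
  · have l' : (65 : Nat) ≤ c.toNat := by exact_mod_cast UInt32.le_iff_toNat_le.mp h3.1
    have r' : c.toNat ≤ 70 := by exact_mod_cast UInt32.le_iff_toNat_le.mp h3.2
    omega

theorem binNat_pos (n : Nat) (h : 0 < n) :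
    binNat n = binNat (n / 2) ++ [if n % 2 = 1 then '1' else '0'] := by
  cases n with
  | zero => omega
  | succ m => rw [binNat]

-- one hex digit appended: 16*a + v in binary is (a in binary) ++ its 4-bit nibble
theorem binNat_nibble (a v : Nat) (ha : 1 ≤ a) (hv : v < 16) :
    binNat (16 * a + v) = binNat a ++ format4 v := by
  have e1 : binNat (16 * a + v) = binNat (8 * a + v / 2) ++ [if v % 2 = 1 then '1' else '0'] := by
    have q : (16 * a + v) / 2 = 8 * a + v / 2 := by omega
    have r : (16 * a + v) % 2 = v % 2 := by omega
    rw [binNat_pos (16 * a + v) (by omega), q, r]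
  have e2 : binNat (8 * a + v / 2) = binNat (4 * a + v / 4) ++ [if v / 2 % 2 = 1 then '1' else '0'] := by
    have q : (8 * a + v / 2) / 2 = 4 * a + v / 4 := by omega
    have r : (8 * a + v / 2) % 2 = v / 2 % 2 := by omega
    rw [binNat_pos (8 * a + v / 2) (by omega), q, r]
  have e3 : binNat (4 * a + v / 4) = binNat (2 * a + v / 8) ++ [if v / 4 % 2 = 1 then '1' else '0'] := by
    have q : (4 * a + v / 4) / 2 = 2 * a + v / 8 := by omega
    have r : (4 * a + v / 4) % 2 = v / 4 % 2 := by omega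
    rw [binNat_pos (4 * a + v / 4) (by omega), q, r]
  have e4 : binNat (2 * a + v / 8) = binNat a ++ [if v / 8 % 2 = 1 then '1' else '0'] := by
    have q : (2 * a + v / 8) / 2 = a := by omega
    have r : (2 * a + v / 8) % 2 = v / 8 % 2 := by omega
    rw [binNat_pos (2 * a + v / 8) (by omega), q, r]
  rw [e1, e2, e3, e4, format4]
  simp

-- B's per-character nibble expansion at the character level
def expandB (cs : List Char) : List Char :=
  cs.flatMap (fun c =>
    match hexVal? c with
    | none => []
    | some v => format4 v)

theorem parse_bin (cs : List Char) :
    ∀ acc n, 1 ≤ acc → parseHexAux acc cs = some n →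
      binNat n = binNat acc ++ expandB cs := by
  induction cs with
  | nil =>
    intro acc n _ h
    simp [parseHexAux] at h
    subst h; simp [expandB]
  | cons c cs ih =>
    intro acc n hacc h
    simp only [parseHexAux] at h
    cases hc : hexVal? c with
    | none => rw [hc] at h; exact absurd h (by simp)
    | some v =>
      rw [hc] at h
      have := ih (16 * acc + v) n (by omega) h
      rw [this, binNat_nibble acc v hacc (hexVal?_lt hc)]
      simp [expandB, hc]

theorem parse_some (cs : List Char) :
    ∀ acc, (∀ c ∈ cs, (hexVal? c).isSome) → ∃ n, parseHexAux acc cs = some n := by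
  induction cs with
  | nil => intro acc _; exact ⟨acc, rfl⟩
  | cons c cs ih =>
    intro acc h
    have hc : (hexVal? c).isSome := h c (by simp)
    cases hhc : hexVal? c with
    | none => rw [hhc] at hc; simp at hc
    | some v =>
      obtain ⟨n, hn⟩ := ih (16 * acc + v) (fun x hx => h x (by simp [hx]))
      exact ⟨n, by simp [parseHexAux, hhc, hn]⟩

theorem symbol_eq (s : String)
    (h : ∀ c ∈ s.toList, isHexCharB c = true) :
    aSymbol s = bSymbol s := by
  have hsome : ∀ c ∈ s.toList, (hexVal? c).isSome := by
    intro c hc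
    rcases of_decide_eq_true (h c hc) with h' | h' | h' <;>
      unfold hexVal? <;> split_ifs <;> first | simp | tauto
  obtain ⟨n, hn⟩ := parse_some s.toList 1 hsome
  have hbin := parse_bin s.toList 1 n (le_refl 1) hn
  have hb1 : binNat 1 = ['1'] := by simp [binNat]
  rw [hb1] at hbin
  have hn0 : n ≠ 0 := by
    intro h0; rw [h0] at hbin; simp [binNat] at hbin
  unfold aSymbol bSymbol
  rw [hn]
  simp only [hn0, ite_false, hbin]
  have hdrop : ∀ x : List Char, List.drop 3 ('0' :: 'b' :: (['1'] ++ x)) = x := fun x => rfl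
  rw [hdrop]
  unfold expandB
  rw [List.map_flatMap]
  congr 1
  funext c
  cases hexVal? c <;> simp

-- ===== VERDICT (by name: the statement is the Claim_ definition above) =====
theorem convertErrorPatternIntoBitSymbol_spec : Claim_equal_convertErrorPatternIntoBitSymbol := by
  intro list _ hpre
  unfold Pre_convertErrorPatternIntoBitSymbol at hpre
  simp only [List.all_eq_true] at hpre
  unfold Spec_convertErrorPatternIntoBitSymbol convertErrorPatternIntoBitSymbol convertErrorPatternIntoBitSymbol_alt
  apply List.map_congr_left
  intro inner hinner
  apply List.map_congr_left
  intro s hs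
  exact symbol_eq s (hpre inner hinner s hs)
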